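-- pv_equiv track=rewrite | github.com/KOMOKlazz/TEST | Classwork/9.py | fibonache
-- ===== SOURCE A (Python) =====
-- def fibonache(n):
--     # 0 1 1 2 3 5 8
--
--     if n == 0:
--         return 1
--     if n == 1:
--         return 2
--     number0 = 0
--     number1 = 1
--     count = 2
--     while n >= number1:
--         if n == number1:
--             return count
--         temp = number1
--         number1 += number0
--         number0 = temp
--         count += 1
--     return -1
-- ===== SOURCE B (Python) =====
-- def fibonache(n):
--     # Fast doubling (F(k), F(k+1)) plus exponential + binary search for the
--     # least index m with F(m) >= n; no sequential scan of the sequence.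
--     def fib2(k):
--         if k == 0:
--             return (0, 1)
--         a, b = fib2(k // 2)
--         c = a * (2 * b - a)
--         d = a * a + b * b
--         if k % 2 == 0:
--             return (c, d)
--         return (d, c + d)
--
--     hi = 1
--     while fib2(hi)[0] < n:
--         hi *= 2
--     lo = 0
--     while lo < hi:
--         mid = (lo + hi) // 2
--         if fib2(mid)[0] < n:
--             lo = mid + 1
--         else:
--             hi = mid
--     return lo + 1 if fib2(lo)[0] == n else -1
-- ===== Notes on version B (the rewrite author's own statement) =====
-- stated objective: alternative
-- what changed: B replaces A's sequential scan of the Fibonacci sequence by fast-doubling evaluation of F(k) (identities F(2k)=F(k)(2F(k+1)-F(k)), F(2k+1)=F(k)^2+F(k+1)^2) combined with an exponential-plus-binary search for the least index m with F(m) >= n, then a single equality check.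
import Mathlib
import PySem

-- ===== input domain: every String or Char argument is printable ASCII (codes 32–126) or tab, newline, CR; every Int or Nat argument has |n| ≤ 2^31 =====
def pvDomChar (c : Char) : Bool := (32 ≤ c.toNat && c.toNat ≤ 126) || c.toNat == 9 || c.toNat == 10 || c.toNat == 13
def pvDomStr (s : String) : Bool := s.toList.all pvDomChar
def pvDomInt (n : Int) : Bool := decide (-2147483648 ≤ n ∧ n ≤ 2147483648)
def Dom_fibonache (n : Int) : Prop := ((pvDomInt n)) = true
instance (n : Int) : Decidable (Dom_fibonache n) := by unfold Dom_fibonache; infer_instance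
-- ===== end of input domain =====

-- B replaces A's sequential scan of the Fibonacci sequence by fast-doubling
-- evaluation of F(k) plus an exponential+binary search for the least index m
-- with F(m) >= n, then one equality check; objective: alternative.

-- ===== PORT A =====
-- A's while loop; the fuel is only a totality guard (never exhausted on the
-- inputs the claim covers: the loop exits once number1 > n)
def fibLoopA (fuel : Nat) (n number0 number1 count : Int) : Int :=
  match fuel with
  | 0 => -1
  | fuel + 1 =>
    if n ≥ number1 then
      if n = number1 then count
      else fibLoopA fuel n number1 (number1 + number0) (count + 1)
    else -1

def fibonache (n : Int) : Int :=
  if n = 0 then 1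
  else if n = 1 then 2
  else fibLoopA (n.toNat + 2) n 0 1 2

-- ===== PORT B =====
-- fast doubling: fib2 k = (F(k), F(k+1)), recursion on k / 2
-- (the fuel only bounds the recursion depth; k / 2 < k, so fuel = k is enough)
def fib2Go (fuel k : Nat) : Int × Int :=
  match fuel with
  | 0 => (0, 1)
  | fuel + 1 =>
    if k = 0 then (0, 1)
    else
      let p := fib2Go fuel (k / 2)
      let a := p.1
      let b := p.2
      let c := a * (2 * b - a)
      let d := a * a + b * b
      if k % 2 = 0 then (c, d) else (d, c + d)

def fib2 (k : Nat) : Int × Int := fib2Go k k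

-- Source B's first while loop (doubling hi); fuel is only a totality guard
def expSearch (fuel : Nat) (n : Int) (hi : Nat) : Nat :=
  match fuel with
  | 0 => hi
  | fuel + 1 => if (fib2 hi).1 < n then expSearch fuel n (hi * 2) else hi

-- Source B's second while loop (binary search); fuel is only a totality guard
def binSearch (fuel : Nat) (n : Int) (lo hi : Nat) : Nat :=
  match fuel with
  | 0 => lo
  | fuel + 1 =>
    if lo < hi then
      let mid := (lo + hi) / 2
      if (fib2 mid).1 < n then binSearch fuel n (mid + 1) hi
      else binSearch fuel n lo mid
    else lo

def fibonache_alt (n : Int) : Int :=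
  let hi := expSearch (n.toNat + 1) n 1
  let lo := binSearch hi n 0 hi
  if (fib2 lo).1 = n then (lo : Int) + 1 else -1

-- ===== PRECONDITION & SPEC =====
def Spec_fibonache (n : Int) (out : Int) : Prop := out = fibonache_alt n
instance (n : Int) (out : Int) : Decidable (Spec_fibonache n out) := by unfold Spec_fibonache; infer_instance

-- ===== CLAIM (what is proved, stated in full; the proofs are below) =====
def Claim_equal_fibonache : Prop := ∀ (n : Int), Dom_fibonache n → Spec_fibonache n (fibonache n)

-- ===== LEMMAS AND PROOFS =====

-- fast doubling computes the Fibonacci pair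
lemma fib2Go_eq : ∀ (fuel k : Nat), k ≤ fuel →
    fib2Go fuel k = ((Nat.fib k : Int), (Nat.fib (k + 1) : Int)) := by
  intro fuel
  induction fuel with
  | zero =>
    intro k hk
    have : k = 0 := by omega
    subst this; simp [fib2Go]
  | succ fuel ih =>
    intro k hk
    by_cases h : k = 0
    · subst h; simp [fib2Go]
    · have hlt : k / 2 < k := Nat.div_lt_self (Nat.pos_of_ne_zero h) one_lt_two
      have hrec := ih (k / 2) (by omega)
      rw [fib2Go]
      simp only [h, if_false, hrec]
      set j := k / 2 with hj
      have hfle : Nat.fib j ≤ 2 * Nat.fib (j + 1) :=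
        le_trans Nat.fib_le_fib_succ (by omega)
      have hc : (Nat.fib j : Int) * (2 * (Nat.fib (j + 1) : Int) - (Nat.fib j : Int))
          = (Nat.fib (2 * j) : Int) := by
        rw [Nat.fib_two_mul]
        push_cast [Nat.cast_sub hfle]
        ring
      have hd : (Nat.fib j : Int) * (Nat.fib j : Int)
            + (Nat.fib (j + 1) : Int) * (Nat.fib (j + 1) : Int)
          = (Nat.fib (2 * j + 1) : Int) := by
        rw [Nat.fib_two_mul_add_one]
        push_cast
        ring
      by_cases hp : k % 2 = 0
      · have hk : k = 2 * j := by omega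
        simp only [hp, if_true]
        rw [hc, hd, hk]
      · have hk : k = 2 * j + 1 := by omega
        simp only [hp, if_false]
        rw [hd, hk]
        have hsum : (Nat.fib j : Int) * (2 * (Nat.fib (j + 1) : Int) - (Nat.fib j : Int))
              + (Nat.fib (2 * j + 1) : Int) = (Nat.fib (2 * j + 1 + 1) : Int) := by
          have hf : (Nat.fib (2 * j + 1 + 1) : Int)
              = (Nat.fib (2 * j) : Int) + (Nat.fib (2 * j + 1) : Int) := by
            rw [show 2 * j + 1 + 1 = 2 * j + 2 by ring, Nat.fib_add_two]
            push_cast; ring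
          rw [hf, hc]
        rw [hsum]

lemma fib2_eq (k : Nat) : fib2 k = ((Nat.fib k : Int), (Nat.fib (k + 1) : Int)) :=
  fib2Go_eq k k le_rfl

-- the exponential search reaches an index whose Fibonacci number is ≥ n
lemma expSearch_ge : ∀ (fuel : Nat) (n : Int) (hi : Nat),
    n ≤ (Nat.fib (hi * 2 ^ fuel) : Int) → n ≤ (Nat.fib (expSearch fuel n hi) : Int) := by
  intro fuel
  induction fuel with
  | zero => intro n hi h; simpa [expSearch] using h
  | succ fuel ih =>
    intro n hi h
    rw [expSearch]
    by_cases hg : (fib2 hi).1 < n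
    · simp only [hg, if_true]
      exact ih n (hi * 2)
        (by rw [show hi * 2 * 2 ^ fuel = hi * 2 ^ (fuel + 1) by rw [Nat.pow_succ]; ring]; exact h)
    · simp only [hg, if_false]
      rw [fib2_eq] at hg
      omega

-- the binary search keeps the invariant: everything below lo is < n, fib hi ≥ n
lemma binSearch_spec : ∀ (fuel : Nat) (n : Int) (lo hi : Nat),
    lo ≤ hi → hi - lo ≤ fuel →
    (∀ k, k < lo → (Nat.fib k : Int) < n) → n ≤ (Nat.fib hi : Int) →
    (∀ k, k < binSearch fuel n lo hi → (Nat.fib k : Int) < n)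
      ∧ n ≤ (Nat.fib (binSearch fuel n lo hi) : Int) := by
  intro fuel
  induction fuel with
  | zero =>
    intro n lo hi hle hfuel hbelow hhi
    have : lo = hi := by omega
    subst this
    simpa [binSearch] using ⟨hbelow, hhi⟩
  | succ fuel ih =>
    intro n lo hi hle hfuel hbelow hhi
    rw [binSearch]
    by_cases hlt : lo < hi
    · simp only [hlt, if_true]
      set mid := (lo + hi) / 2 with hmid
      have hm1 : lo ≤ mid := by omega
      have hm2 : mid < hi := by omega
      by_cases hg : (fib2 mid).1 < n
      · simp only [hg, if_true]
        rw [fib2_eq] at hg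
        refine ih n (mid + 1) hi (by omega) (by omega) ?_ hhi
        intro k hk
        rcases lt_or_ge k lo with hkl | hkl
        · exact hbelow k hkl
        · calc (Nat.fib k : Int) ≤ (Nat.fib mid : Int) := by
                exact_mod_cast Nat.fib_mono (by omega)
            _ < n := hg
      · simp only [hg, if_false]
        rw [fib2_eq] at hg
        exact ih n lo mid (by omega) (by omega) hbelow (by omega)
    · simp only [hlt, if_false]
      have : lo = hi := by omega
      subst this
      exact ⟨hbelow, hhi⟩

-- fib is injective on values ≥ 2
lemma fib_unique {k m : Nat} (h2 : 2 ≤ Nat.fib k) (he : Nat.fib k = Nat.fib m) : k = m := by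
  have h2m : 2 ≤ Nat.fib m := he ▸ h2
  have hk3 : 3 ≤ k := by
    by_contra hk
    interval_cases k <;> exact absurd h2 (by decide)
  have hm3 : 3 ≤ m := by
    by_contra hm
    interval_cases m <;> exact absurd h2m (by decide)
  rcases lt_trichotomy k m with h | h | h
  · have := Nat.fib_lt_fib_succ (n := k) (by omega)
    have h2' := Nat.fib_mono (show k + 1 ≤ m by omega)
    omega
  · exact h
  · have := Nat.fib_lt_fib_succ (n := m) (by omega)
    have h2' := Nat.fib_mono (show m + 1 ≤ k by omega)
    omega

-- A's loop when n is the Fibonacci number of index m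
lemma loopA_ret (n : Int) (m : Nat) (hm : (Nat.fib m : Int) = n) (hn2 : 2 ≤ n)
    (hU : ∀ k, (Nat.fib k : Int) = n → k = m) :
    ∀ (fuel c : Nat), 2 ≤ c → c ≤ m + 1 → m + 2 ≤ c + fuel →
      fibLoopA fuel n (Nat.fib (c - 2)) (Nat.fib (c - 1)) (c : Int) = (m : Int) + 1 := by
  intro fuel
  induction fuel with
  | zero => intro c h2 hcm hf; omega
  | succ fuel ih =>
    intro c h2 hcm hf
    rw [fibLoopA]
    by_cases hce : c = m + 1
    · subst hce
      have h1 : (Nat.fib (m + 1 - 1) : Int) = n := by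
        rw [show m + 1 - 1 = m by omega]; exact hm
      simp only [h1, ge_iff_le, le_refl, if_true]
      push_cast; ring
    · have hclt : c ≤ m := by omega
      have hmono : Nat.fib (c - 1) ≤ Nat.fib m := Nat.fib_mono (by omega)
      have hguard : n ≥ (Nat.fib (c - 1) : Int) := by omega
      have hne : ¬ (n = (Nat.fib (c - 1) : Int)) := by
        intro h
        have := hU (c - 1) h.symm
        omega
      simp only [hguard, if_true, hne, if_false]
      have hstep : (Nat.fib (c - 1) : Int) + (Nat.fib (c - 2) : Int)
          = (Nat.fib ((c + 1) - 1) : Int) := by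
        rw [show (c + 1) - 1 = (c - 2) + 2 by omega, Nat.fib_add_two,
          show (c - 2) + 1 = c - 1 by omega]
        push_cast; ring
      have hrec := ih (c + 1) (by omega) (by omega) (by omega)
      rw [show (c + 1) - 2 = c - 1 by omega] at hrec
      rw [hstep]
      convert hrec using 2

-- A's loop when no Fibonacci number equals n
lemma loopA_none (n : Int) (hno : ∀ k, (Nat.fib k : Int) ≠ n) :
    ∀ (fuel c : Nat) (x : Int), 2 ≤ c →
      fibLoopA fuel n (Nat.fib (c - 2)) (Nat.fib (c - 1)) x = -1 := by
  intro fuel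
  induction fuel with
  | zero => intro c x _; rw [fibLoopA]
  | succ fuel ih =>
    intro c x h2
    rw [fibLoopA]
    by_cases hg : n ≥ (Nat.fib (c - 1) : Int)
    · have hne : ¬ (n = (Nat.fib (c - 1) : Int)) := fun h => hno (c - 1) h.symm
      simp only [hg, if_true, hne, if_false]
      have hstep : (Nat.fib (c - 1) : Int) + (Nat.fib (c - 2) : Int)
          = (Nat.fib ((c + 1) - 1) : Int) := by
        rw [show (c + 1) - 1 = (c - 2) + 2 by omega, Nat.fib_add_two,
          show (c - 2) + 1 = c - 1 by omega]
        push_cast; ring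
      rw [hstep]
      have := ih (c + 1) (x + 1) (by omega)
      rw [show (c + 1) - 2 = c - 1 by omega] at this
      exact this
    · simp only [hg, if_false]

-- fib k + 1 ≥ k gives fuel sufficiency bounds
lemma expSearch_top (n : Int) (hn : 2 ≤ n) :
    n ≤ (Nat.fib (expSearch (n.toNat + 1) n 1) : Int) := by
  apply expSearch_ge
  have h1 : n.toNat + 1 < 2 ^ (n.toNat + 1) := Nat.lt_two_pow_self
  have h2 : 2 ^ (n.toNat + 1) ≤ Nat.fib (2 ^ (n.toNat + 1)) + 1 :=
    Nat.le_fib_add_one _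
  have h3 : (n.toNat : Int) = n := Int.toNat_of_nonneg (by omega)
  rw [Nat.one_mul]
  omega

-- ===== VERDICT (by name: the statement is the Claim_ definition above) =====
theorem fibonache_spec : Claim_equal_fibonache := by
  intro n _
  unfold Spec_fibonache
  rcases lt_trichotomy n 2 with hlt | h | hgt
  · -- n < 2: n negative, 0 or 1; small closed computations
    rcases lt_trichotomy n 0 with hneg | hz | hpos
    · have ht : n.toNat = 0 := Int.toNat_of_nonpos (le_of_lt hneg)
      have hA : fibonache n = -1 := by
        simp [fibonache, show n ≠ 0 by omega, show n ≠ 1 by omega,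
          fibLoopA, show ¬ n ≥ (1 : Int) by omega, ht]
      have hB : fibonache_alt n = -1 := by
        simp [fibonache_alt, ht, expSearch, binSearch, fib2_eq,
          show ¬ (1 : Int) < n by omega, show ¬ (0 : Int) < n by omega,
          show ¬ (0 : Int) = n by omega]
      rw [hA, hB]
    · subst hz; decide
    · have h1 : n = 1 := by omega
      subst h1; decide
  · subst h; decide
  · -- 2 < n is impossible to reach with n = 2; treat n ≥ 2 via hn2 (n = 2 was handled by decide)
    have hn2 : 2 ≤ n := by omega
    -- B's search result
    have hhi := expSearch_top n hn2
    set H := expSearch (n.toNat + 1) n 1 with hH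
    have hbin := binSearch_spec H n 0 H (Nat.zero_le H) (by omega)
      (by intro k hk; omega) hhi
    set r := binSearch H n 0 H with hr
    obtain ⟨hrlow, hrge⟩ := hbin
    have hAexp : fibonache n = fibLoopA (n.toNat + 2) n 0 1 2 := by
      simp [fibonache, show n ≠ 0 by omega, show n ≠ 1 by omega]
    have hBexp : fibonache_alt n
        = if (fib2 r).1 = n then (r : Int) + 1 else -1 := rfl
    by_cases hex : ∃ m, (Nat.fib m : Int) = n
    · obtain ⟨m, hm⟩ := hex
      have hU : ∀ k, (Nat.fib k : Int) = n → k = m := by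
        intro k hk
        exact fib_unique (by omega) (by omega)
      -- A returns m + 1
      have hA : fibonache n = (m : Int) + 1 := by
        rw [hAexp]
        have hmle : m ≤ n.toNat + 1 := by
          have := Nat.le_fib_add_one m
          omega
        have := loopA_ret n m hm hn2 hU (n.toNat + 2) 2 (by omega) ?_ (by omega)
        · simpa [Nat.fib] using this
        · -- 2 ≤ m + 1: fib m = n ≥ 2 forces m ≥ 1
          have h2f : 2 ≤ Nat.fib m := by omega
          rcases Nat.eq_zero_or_pos m with h0 | h0
          · subst h0; simp [Nat.fib] at h2f
          · omega
      -- B returns m + 1 as well: r = m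
      have hrm : r = m := by
        have hmr : m < r → False := fun h => by have := hrlow m h; omega
        have hrmle : r ≤ m := by
          by_contra hcon
          exact hmr (by omega)
        rcases Nat.eq_or_lt_of_le hrmle with he | hlt'
        · exact he
        · have hle : Nat.fib r ≤ Nat.fib m := Nat.fib_mono (by omega)
          have : (Nat.fib r : Int) = n := by omega
          have := hU r this
          omega
      rw [hA, hBexp, fib2_eq, hrm, if_pos hm]
    · push_neg at hex
      have hA : fibonache n = -1 := by
        rw [hAexp]
        exact loopA_none n hex (n.toNat + 2) 2 2 (by omega)
      have hB : fibonache_alt n = -1 := by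
        rw [hBexp, fib2_eq, if_neg (hex r)]
      rw [hA, hB]
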